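-- pv_equiv track=rewrite | github.com/Yuraist/pymatrixmod | pymatrixmod.py | controllability_matrix
-- ===== SOURCE A (Python) =====
-- import copy
--
-- def multiply_matrix(A, B):
-- 	N = len(A)
-- 	M = len(A[0])
-- 	P = len(B[0])
--
-- 	C = [[i for i in range(P)] for j in range(N)]
--
-- 	for i in range(N):
-- 		for j in range(P):
-- 			sum = 0
-- 			for k in range(M):
-- 				sum += int(A[i][k]) * int(B[k][j])
-- 			C[i][j] = sum
-- 	return C
--
-- def pow_matrix(matrix, n):
-- 	new_matrix = matrix[:]
--
-- 	for i in range(n - 1):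
-- 		new_matrix = multiply_matrix(matrix, new_matrix)
--
-- 	return new_matrix
--
-- def controllability_matrix(mat_A, mat_B):
-- 	A = copy.deepcopy(mat_A)
-- 	B = copy.deepcopy(mat_B)
--
-- 	result_matrix = []
-- 	result_matrix.append(B)
--
-- 	for n in range(1, len(A)):
-- 		power = pow_matrix(A, n)
-- 		product = multiply_matrix(power, B)
-- 		result_matrix.append(product)
--
-- 	for i in range(len(result_matrix)):
-- 		temp_arr = []
-- 		for item in result_matrix[i]:
-- 			temp_arr.append(item[0])
-- 		result_matrix[i] = temp_arr
--
-- 	return result_matrix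
-- ===== SOURCE B (Python) =====
-- def controllability_matrix(mat_A, mat_B):
--     # Incremental matrix-vector iteration: track only the first column v,
--     # with v_{k} = A * v_{k-1}, instead of recomputing A^k and A^k*B each step.
--     v = [row[0] for row in mat_B]
--     result = [v]
--     for _ in range(1, len(mat_A)):
--         v = [sum(a * x for a, x in zip(row, v)) for row in mat_A]
--         result.append(v)
--     return result
-- ===== Notes on version B (the rewrite author's own statement) =====
-- stated objective: faster
-- what changed: Instead of recomputing A^k from scratch and the full product A^k*B for every k and then discarding all but the first column, B tracks only the first column as a vector and updates it with one matrix-vector product per step.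
import Mathlib
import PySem

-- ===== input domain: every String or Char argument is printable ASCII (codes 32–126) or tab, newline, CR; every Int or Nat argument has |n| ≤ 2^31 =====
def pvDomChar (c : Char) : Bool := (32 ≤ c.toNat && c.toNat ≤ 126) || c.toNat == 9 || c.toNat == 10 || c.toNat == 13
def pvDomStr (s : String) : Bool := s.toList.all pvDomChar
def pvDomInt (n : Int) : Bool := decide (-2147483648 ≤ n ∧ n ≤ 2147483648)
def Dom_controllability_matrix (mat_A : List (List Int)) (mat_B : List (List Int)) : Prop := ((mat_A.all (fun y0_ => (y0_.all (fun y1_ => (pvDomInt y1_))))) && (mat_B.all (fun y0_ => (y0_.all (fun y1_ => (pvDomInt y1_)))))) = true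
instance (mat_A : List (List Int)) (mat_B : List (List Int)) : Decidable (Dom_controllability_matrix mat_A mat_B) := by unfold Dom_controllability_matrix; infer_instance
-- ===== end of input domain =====

-- B replaces A's per-step recomputation of A^k and of the full product A^k·B by tracking only the
-- first column as a vector updated with one matrix-vector product per step (objective: faster).

-- ===== PORT A =====
-- multiply_matrix: the initial comprehension C is fully overwritten by the loops, so each entry is the computed sum.
-- Indexing A[i][k] etc. is ported with getD; inside Pre_ every index is in range, matching Python exactly.
def multiply_matrix (A : List (List Int)) (B : List (List Int)) : List (List Int) :=
  let N := A.length
  let M := (A.getD 0 []).length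
  let P := (B.getD 0 []).length
  (List.range N).map (fun i =>
    (List.range P).map (fun j =>
      (List.range M).foldl (fun s k => s + (A.getD i []).getD k 0 * (B.getD k []).getD j 0) 0))

def pow_matrix (matrix : List (List Int)) (n : Nat) : List (List Int) :=
  (List.range (n - 1)).foldl (fun acc _ => multiply_matrix matrix acc) matrix

def controllability_matrix (mat_A : List (List Int)) (mat_B : List (List Int)) : List (List Int) :=
  let result : List (List (List Int)) :=
    mat_B :: (List.range' 1 (mat_A.length - 1)).map
      (fun n => multiply_matrix (pow_matrix mat_A n) mat_B)
  result.map (fun m => m.map (fun row => row.getD 0 0))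

-- ===== PORT B =====
-- row[0] of B is ported with getD; inside Pre_ rows of mat_B are nonempty, matching Python exactly.
def controllability_matrix_alt (mat_A : List (List Int)) (mat_B : List (List Int)) : List (List Int) :=
  let v0 := mat_B.map (fun row => row.getD 0 0)
  ((List.range' 1 (mat_A.length - 1)).foldl
    (fun (st : List (List Int) × List Int) _ =>
      let v' := mat_A.map (fun row => (row.zip st.2).foldl (fun s p => s + p.1 * p.2) 0)
      (st.1 ++ [v'], v'))
    ([v0], v0)).1

-- ===== PRECONDITION & SPEC =====
-- Pre_ excludes inputs where Python A raises IndexError (empty rows of mat_B, shapes too small for the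
-- chained indexing) and, for len(mat_A) ≥ 2, restricts to the natural domain of the function: square
-- mat_A and a conforming rectangular mat_B. Ragged or size-mismatched matrices on which A's partial
-- indexing happens to succeed are excluded as accidental (B agrees on many of them but not all).
def Pre_controllability_matrix (mat_A : List (List Int)) (mat_B : List (List Int)) : Prop :=
  (mat_A.length ≤ 1 ∧ ∀ row ∈ mat_B, row ≠ []) ∨
  (2 ≤ mat_A.length ∧ (∀ row ∈ mat_A, row.length = mat_A.length) ∧
    mat_A.length ≤ mat_B.length ∧
    (∀ row ∈ mat_B, row.length = (mat_B.headD []).length) ∧ mat_B.headD [] ≠ [])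
instance (mat_A : List (List Int)) (mat_B : List (List Int)) : Decidable (Pre_controllability_matrix mat_A mat_B) := by unfold Pre_controllability_matrix; infer_instance

def pvWitness_controllability_matrix : List (List Int) × List (List Int) :=
  ([[1, 0], [2, 1]], [[1], [3]])

def Spec_controllability_matrix (mat_A : List (List Int)) (mat_B : List (List Int)) (out : List (List Int)) : Prop := out = controllability_matrix_alt mat_A mat_B
instance (mat_A : List (List Int)) (mat_B : List (List Int)) (out : List (List Int)) : Decidable (Spec_controllability_matrix mat_A mat_B out) := by unfold Spec_controllability_matrix; infer_instance

-- ===== CLAIM (what is proved, stated in full; the proofs are below) =====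
def Claim_equal_controllability_matrix : Prop := ∀ (mat_A : List (List Int)) (mat_B : List (List Int)), Dom_controllability_matrix mat_A mat_B → Pre_controllability_matrix mat_A mat_B → Spec_controllability_matrix mat_A mat_B (controllability_matrix mat_A mat_B)

-- ===== LEMMAS AND PROOFS =====

-- B's one-step update, named for the proofs.
def stepv (A : List (List Int)) (v : List Int) : List Int :=
  A.map (fun row => (row.zip v).foldl (fun s p => s + p.1 * p.2) 0)

-- B's accumulating foldl produces the iterates of stepv.
lemma foldl_iter (A : List (List Int)) (l : List Nat) (res : List (List Int)) (v : List Int) :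
    (l.foldl
      (fun (st : List (List Int) × List Int) _ =>
        let v' := A.map (fun row => (row.zip st.2).foldl (fun s p => s + p.1 * p.2) 0)
        (st.1 ++ [v'], v'))
      (res, v)) =
    (res ++ (List.range l.length).map (fun k => (stepv A)^[k + 1] v), (stepv A)^[l.length] v) := by
  induction l generalizing res v with
  | nil => simp
  | cons x l ih =>
    simp only [List.foldl_cons, ih, List.length_cons, List.range_succ_eq_map, List.map_cons,
      List.map_map, Prod.mk.injEq]
    have hmap : List.map (fun k => (stepv A)^[k + 1] (stepv A v)) (List.range l.length)
        = List.map ((fun k => (stepv A)^[k + 1] v) ∘ Nat.succ) (List.range l.length) := by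
      apply List.map_congr_left
      intro k _
      show (stepv A)^[k + 1] (stepv A v) = (stepv A)^[k + 1 + 1] v
      rw [← Function.iterate_succ_apply]
    refine ⟨?_, ?_⟩
    · rw [List.append_assoc]
      show res ++ ((stepv A v) :: List.map (fun k => (stepv A)^[k + 1] (stepv A v)) (List.range l.length)) = _
      rw [hmap]
      rfl
    · show (stepv A)^[l.length] (stepv A v) = (stepv A)^[l.length + 1] v
      rw [← Function.iterate_succ_apply]

-- getD of a map, in range.
lemma getD_map_in {α β : Type} (f : α → β) (l : List α) (i : Nat) (h : i < l.length) (d : β) (d' : α) :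
    (l.map f).getD i d = f (l.getD i d') := by
  simp [List.getD_eq_getElem?_getD, h]

-- a map over a list as a map over its index range
lemma map_eq_map_range {α β : Type} (f : α → β) (l : List α) (d : α) :
    l.map f = (List.range l.length).map (fun i => f (l.getD i d)) := by
  apply List.ext_getElem
  · simp
  · intro i h1 h2
    simp only [List.getElem_map, List.getElem_range]
    congr 1
    simp only [List.length_map] at h1
    simp [List.getD_eq_getElem?_getD, h1]

lemma getD_mem {α : Type} (l : List α) (i : Nat) (h : i < l.length) (d : α) : l.getD i d ∈ l := by
  simp [List.getD_eq_getElem?_getD, h, List.getElem_mem]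

-- zip-dot-product as a range sum, when the row is at most as long as the vector
lemma zipdot_eq_sum (row v : List Int) (h : row.length ≤ v.length) :
    (row.zip v).foldl (fun s p => s + p.1 * p.2) 0 =
    ∑ k ∈ Finset.range row.length, row.getD k 0 * v.getD k 0 := by
  induction row generalizing v with
  | nil => simp
  | cons a row ih =>
    cases v with
    | nil => simp at h
    | cons b v =>
      simp only [List.zip_cons_cons, List.foldl_cons, List.length_cons, Finset.sum_range_succ']
      simp only [List.length_cons, Nat.add_le_add_iff_right] at h
      have : ∀ (s : Int) (l : List (Int × Int)),
          l.foldl (fun s p => s + p.1 * p.2) s = s + l.foldl (fun s p => s + p.1 * p.2) 0 := by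
        intro s l
        rw [PySem.List.foldl_add l (fun p => p.1 * p.2) s, PySem.List.foldl_add l (fun p => p.1 * p.2) 0]
        ring
      rw [this, ih v h]
      simp [add_comm]

-- the range-foldl sum in multiply_matrix as a Finset sum
lemma foldl_range_sum (m : Nat) (f : Nat → Int) :
    (List.range m).foldl (fun s k => s + f k) 0 = ∑ k ∈ Finset.range m, f k := by
  rw [PySem.List.foldl_add (List.range m) f 0]
  simp
  rfl

-- first column of a product, when the right factor's first row is nonempty
lemma col0_mul (A X : List (List Int)) (hP : 0 < (X.getD 0 []).length) :
    (multiply_matrix A X).map (fun row => row.getD 0 0) =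
    (List.range A.length).map (fun i =>
      ∑ k ∈ Finset.range (A.getD 0 []).length, (A.getD i []).getD k 0 * (X.getD k []).getD 0 0) := by
  unfold multiply_matrix
  simp only [List.map_map]
  apply List.map_congr_left
  intro i _
  simp only [Function.comp]
  rw [PySem.List.getD_map_range _ _ _ _ hP, foldl_range_sum]

-- entries of a product row, in range
lemma mul_getD (A X : List (List Int)) (i j : Nat) (hi : i < A.length)
    (hj : j < (X.getD 0 []).length) :
    ((multiply_matrix A X).getD i []).getD j 0 =
    ∑ k ∈ Finset.range (A.getD 0 []).length, (A.getD i []).getD k 0 * (X.getD k []).getD j 0 := by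
  unfold multiply_matrix
  simp only
  rw [PySem.List.getD_map_range _ _ _ _ hi, PySem.List.getD_map_range _ _ _ _ hj, foldl_range_sum]

-- shape of a product
lemma mul_shape (A X : List (List Int)) :
    (multiply_matrix A X).length = A.length ∧
    ∀ row ∈ multiply_matrix A X, row.length = (X.getD 0 []).length := by
  unfold multiply_matrix
  constructor
  · simp
  · intro row hrow
    simp only [List.mem_map] at hrow
    obtain ⟨i, _, rfl⟩ := hrow
    simp

-- pow_matrix unfolds one multiplication for k ≥ 1
lemma powm_succ (A : List (List Int)) (k : Nat) (hk : 1 ≤ k) :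
    pow_matrix A (k + 1) = multiply_matrix A (pow_matrix A k) := by
  unfold pow_matrix
  have h1 : k + 1 - 1 = (k - 1) + 1 := by omega
  rw [h1, List.range_succ, List.foldl_append]
  rfl

-- squareness predicate maintained along the powers
def SquareN (n : Nat) (X : List (List Int)) : Prop :=
  X.length = n ∧ ∀ row ∈ X, row.length = n

lemma square_mul (n : Nat) (hn : 0 < n) (A X : List (List Int)) (hA : A.length = n)
    (hX : SquareN n X) : SquareN n (multiply_matrix A X) := by
  obtain ⟨hXl, hXr⟩ := hX
  have hX0 : (X.getD 0 []).length = n := hXr _ (getD_mem X 0 (by omega) [])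
  obtain ⟨h1, h2⟩ := mul_shape A X
  exact ⟨by rw [h1, hA], fun row hrow => by rw [h2 row hrow, hX0]⟩

lemma square_pow (A : List (List Int)) (n : Nat) (hn : 2 ≤ n) (hA : A.length = n)
    (hAr : ∀ row ∈ A, row.length = n) (k : Nat) (hk : 1 ≤ k) : SquareN n (pow_matrix A k) := by
  induction k with
  | zero => omega
  | succ k ih =>
    rcases Nat.lt_or_ge 1 (k + 1) with h | h
    · have hk1 : 1 ≤ k := by omega
      rw [powm_succ A k hk1]
      exact square_mul n (by omega) A _ hA (ih hk1)
    · have : k = 0 := by omega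
      subst this
      show SquareN n (pow_matrix A 1)
      unfold pow_matrix
      simpa using ⟨hA, hAr⟩

-- stepv over a square matrix, entrywise
lemma stepv_eq (n : Nat) (A : List (List Int)) (v : List Int) (hA : A.length = n)
    (hAr : ∀ row ∈ A, row.length = n) (hv : n ≤ v.length) :
    stepv A v = (List.range n).map (fun i =>
      ∑ k ∈ Finset.range n, (A.getD i []).getD k 0 * v.getD k 0) := by
  unfold stepv
  rw [map_eq_map_range _ A [], hA]
  apply List.map_congr_left
  intro i hi
  simp only [List.mem_range] at hi
  have hrow : (A.getD i []).length = n := hAr _ (getD_mem A i (by omega) [])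
  rw [zipdot_eq_sum _ v (by omega), hrow]

-- the heart: for k ≥ 1, the first column of (A^k)·B is the k-th iterate of B's vector update
lemma col_pow_eq_iter (A B : List (List Int)) (n : Nat) (hn : 2 ≤ n) (hA : A.length = n)
    (hAr : ∀ row ∈ A, row.length = n) (hB : n ≤ B.length)
    (hBr : ∀ row ∈ B, row.length = (B.headD []).length) (hB0 : B.headD [] ≠ []) (k : Nat) (hk : 1 ≤ k) :
    (multiply_matrix (pow_matrix A k) B).map (fun row => row.getD 0 0) =
    (stepv A)^[k] (B.map (fun row => row.getD 0 0)) := by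
  have hBne : B ≠ [] := by intro h; subst h; simp at hB; omega
  have hBgd : B.getD 0 [] = B.headD [] := by
    cases B with
    | nil => rfl
    | cons h t => rfl
  have hB0len : 0 < (B.getD 0 []).length := by
    rw [hBgd]; cases h : B.headD [] <;> simp_all
  have hA0 : (A.getD 0 []).length = n := hAr _ (getD_mem A 0 (by omega) [])
  have hv0 : n ≤ (B.map (fun row => row.getD 0 0)).length := by simp [hB]
  induction k with
  | zero => omega
  | succ k ih =>
    rcases Nat.lt_or_ge 1 (k + 1) with h | h
    · -- inductive case: k ≥ 1
      have hk1 : 1 ≤ k := by omega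
      have hXsq : SquareN n (pow_matrix A k) := square_pow A n hn hA hAr k hk1
      obtain ⟨hXl, hXr⟩ := hXsq
      have hX0 : ((pow_matrix A k).getD 0 []).length = n :=
        hXr _ (getD_mem _ 0 (by omega) [])
      set X := pow_matrix A k with hXdef
      -- left side
      rw [powm_succ A k hk1]
      have hAX0 : ((multiply_matrix A X).getD 0 []).length = n := by
        obtain ⟨h1, h2⟩ := mul_shape A X
        rw [h2 _ (getD_mem _ 0 (by rw [h1]; omega) []), hX0]
      rw [col0_mul (multiply_matrix A X) B hB0len, (mul_shape A X).1, hA, hAX0]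
      -- right side
      rw [Function.iterate_succ_apply' (stepv A), ← ih hk1]
      have hcollen : n ≤ ((multiply_matrix X B).map (fun row => row.getD 0 0)).length := by
        simp [(mul_shape X B).1, hXl]
      rw [stepv_eq n A _ hA hAr hcollen]
      apply List.map_congr_left
      intro i hi
      simp only [List.mem_range] at hi
      -- both sides are double sums; swap and reassociate
      have hmulXB : ∀ l, l < n →
          ((multiply_matrix X B).map (fun row => row.getD 0 0)).getD l 0 =
          ∑ k' ∈ Finset.range n, (X.getD l []).getD k' 0 * (B.getD k' []).getD 0 0 := by
        intro l hl
        rw [getD_map_in _ _ l (by rw [(mul_shape X B).1, hXl]; omega) 0 []]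
        rw [mul_getD X B l 0 (by omega) hB0len, hX0]
      have hmulAX : ∀ j, j < n →
          ((multiply_matrix A X).getD i []).getD j 0 =
          ∑ l ∈ Finset.range n, (A.getD i []).getD l 0 * (X.getD l []).getD j 0 := by
        intro j hj
        rw [mul_getD A X i j (by omega) (by omega), hA0]
      calc ∑ j ∈ Finset.range n, ((multiply_matrix A X).getD i []).getD j 0 * (B.getD j []).getD 0 0
          = ∑ j ∈ Finset.range n, ∑ l ∈ Finset.range n,
              (A.getD i []).getD l 0 * (X.getD l []).getD j 0 * (B.getD j []).getD 0 0 := by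
            apply Finset.sum_congr rfl
            intro j hj
            rw [hmulAX j (Finset.mem_range.mp hj), Finset.sum_mul]
        _ = ∑ l ∈ Finset.range n, (A.getD i []).getD l 0 *
              ((multiply_matrix X B).map (fun row => row.getD 0 0)).getD l 0 := by
            rw [Finset.sum_comm]
            apply Finset.sum_congr rfl
            intro l hl
            rw [hmulXB l (Finset.mem_range.mp hl), Finset.mul_sum]
            apply Finset.sum_congr rfl
            intro j _
            ring
    · -- base case: k = 0, so k + 1 = 1 and pow_matrix A 1 = A
      have hk0 : k = 0 := by omega
      subst hk0
      have hpow1 : pow_matrix A 1 = A := by unfold pow_matrix; simp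
      rw [hpow1, col0_mul A B hB0len, hA, hA0, Function.iterate_one,
        stepv_eq n A _ hA hAr hv0]
      apply List.map_congr_left
      intro i _
      apply Finset.sum_congr rfl
      intro k' hk'
      rw [getD_map_in _ B k' (by have := Finset.mem_range.mp hk'; omega) 0 []]

-- ===== VERDICT (by name: the statement is the Claim_ definition above) =====
theorem controllability_matrix_spec : Claim_equal_controllability_matrix := by
  intro mat_A mat_B _ hpre
  show controllability_matrix mat_A mat_B = controllability_matrix_alt mat_A mat_B
  unfold controllability_matrix controllability_matrix_alt
  simp only
  rw [foldl_iter mat_A _ _ _]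
  simp only [List.length_range']
  rcases hpre with ⟨h1, _⟩ | ⟨hn, hAr, hB, hBr, hB0⟩
  · -- len(mat_A) ≤ 1: both sides are the single first column of mat_B
    have : mat_A.length - 1 = 0 := by omega
    simp [this]
  · -- len(mat_A) ≥ 2
    rw [List.range'_eq_map_range]
    simp only [List.map_map, List.map_cons]
    congr 1
    apply List.map_congr_left
    intro k _
    simp only [Function.comp]
    rw [col_pow_eq_iter mat_A mat_B mat_A.length hn rfl hAr hB hBr hB0 (1 + k) (by omega)]
    congr 1
    omega
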